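-- pv_equiv track=rewrite | github.com/zolyomiake/400 | compression_helpers.py | decompress_neighbors_vertical
-- ===== SOURCE A (Python) =====
-- def decompress_neighbors_vertical(items, width, height, k_centers, compression_height):
--     decompressed = []
--     tuple_list = []
--     expansion_count = 0
--     for c in items:
--         decomp_tmp = []
--         comp_val = c
--         for h in range(compression_height - 1, -1, -1):
--             divisor = pow(k_centers, h)
--             decomp_val = comp_val // divisor
--             comp_val -= decomp_val * divisor
--             decomp_tmp.append(decomp_val)
--         decomp_tmp.reverse()
--         tuple_list.append(tuple(decomp_tmp))
--
--         if len(tuple_list) == width: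
--             expansion_count += 1
--             for t in range(0, compression_height):
--                 if len(decompressed) < width * height:
--                     row_items = [x[t] for x in tuple_list]
--                     decompressed.extend(row_items)
--             tuple_list.clear()
--
--     return decompressed
-- ===== SOURCE B (Python) =====
-- def decompress_neighbors_vertical(items, width, height, k_centers, compression_height):
--     # Phase 1: decode every item into its base-k digit tuple (LSB-first), using a
--     # running power and divmod instead of recomputing pow() each step.
--     tuples = []
--     for c in items:
--         if compression_height <= 0:
--             tuples.append(())
--             continue
--         p = k_centers ** (compression_height - 1)
--         v = c
--         msb = []
--         for _ in range(compression_height - 1):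
--             d, v = divmod(v, p)
--             msb.append(d)
--             p //= k_centers
--         msb.append(v)
--         tuples.append(tuple(reversed(msb)))
--     # Phase 2: consume full width-sized chunks (a trailing partial chunk is dropped),
--     # emitting one row per digit position, under the global width*height cap.
--     out = []
--     cap = width * height
--     if width > 0:
--         rest = tuples
--         while len(rest) >= width:
--             chunk, rest = rest[:width], rest[width:]
--             for t in range(compression_height):
--                 if len(out) < cap:
--                     out.extend(row[t] for row in chunk)
--     return out
-- ===== Notes on version B (the rewrite author's own statement) =====
-- stated objective: alternative
-- what changed: Two-phase decomposition: first decode every item into its digit tuple with a running power and divmod (instead of recomputing pow(k,h) inside a per-item countdown loop), then consume the tuple list in explicit width-sized chunks with a while loop (instead of streaming items through a buffer that is flushed and cleared when it fills).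
import Mathlib
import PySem

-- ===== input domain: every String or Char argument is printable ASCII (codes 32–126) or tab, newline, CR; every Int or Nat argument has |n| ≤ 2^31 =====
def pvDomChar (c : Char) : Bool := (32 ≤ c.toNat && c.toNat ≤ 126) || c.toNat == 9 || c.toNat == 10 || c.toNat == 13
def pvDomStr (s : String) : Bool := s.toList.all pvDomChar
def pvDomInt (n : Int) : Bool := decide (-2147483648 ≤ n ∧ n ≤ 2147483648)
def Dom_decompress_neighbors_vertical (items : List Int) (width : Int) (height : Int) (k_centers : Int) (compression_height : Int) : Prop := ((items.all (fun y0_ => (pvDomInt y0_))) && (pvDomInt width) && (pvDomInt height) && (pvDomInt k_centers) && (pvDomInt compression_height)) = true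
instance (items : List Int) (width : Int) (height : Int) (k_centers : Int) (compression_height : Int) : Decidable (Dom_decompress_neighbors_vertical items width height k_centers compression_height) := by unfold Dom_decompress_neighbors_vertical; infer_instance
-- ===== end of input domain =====

-- B re-decomposes the task in two phases (running-power divmod digit decoding, then explicit
-- width-sized chunk consumption) instead of A's streaming buffer with per-item pow(); return
-- values agree on all inputs where A returns (Pre_ only excludes A's ZeroDivisionError region).


-- ===== PORT A =====
-- inner digit-extraction step: divisor = pow(k_centers, h); decomp_val = comp_val // divisor; comp_val -= decomp_val * divisor
-- (h ≥ 0 along range(compression_height-1, -1, -1), so `k_centers ^ h.toNat` is exactly Python's pow)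
def aInnerStep (k_centers : Int) (s : List Int × Int) (h : Int) : List Int × Int :=
  let divisor := k_centers ^ h.toNat
  let d := PySem.Int.floordiv s.2 divisor
  (s.1 ++ [d], s.2 - d * divisor)

-- flush body: if len(decompressed) < width*height: decompressed.extend([x[t] for x in tuple_list])
-- (x[t] is always in range when executed; `(pyGet? …).getD 0` is exact there)
def aFlushStep (width height : Int) (tl : List (List Int)) (dec : List Int) (t : Int) : List Int :=
  if (dec.length : Int) < width * height then
    dec ++ tl.map (fun x => (PySem.List.pyGet? x t).getD 0)
  else dec

-- per-item body of A's main loop; state = (decompressed, tuple_list); expansion_count is unused by the return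
def aStep (width height k_centers compression_height : Int)
    (st : List Int × List (List Int)) (c : Int) : List Int × List (List Int) :=
  let inner := (PySem.List.pyRange (compression_height - 1) (-1) (-1)).foldl (aInnerStep k_centers) ([], c)
  let tl := st.2 ++ [inner.1.reverse]
  if (tl.length : Int) = width then
    ((PySem.List.pyRange 0 compression_height 1).foldl (aFlushStep width height tl) st.1, [])
  else (st.1, tl)

def decompress_neighbors_vertical (items : List Int) (width : Int) (height : Int) (k_centers : Int) (compression_height : Int) : List Int :=
  (items.foldl (aStep width height k_centers compression_height) ([], [])).1

-- ===== PORT B =====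
-- phase 1: digits of one item, LSB-first, via a running power p and divmod
def bDigits (k_centers compression_height : Int) (c : Int) : List Int :=
  if compression_height ≤ 0 then []
  else
    let r := (PySem.List.pyRange 0 (compression_height - 1) 1).foldl
      (fun (s : List Int × Int × Int) _ =>
        (s.1 ++ [PySem.Int.floordiv s.2.1 s.2.2], PySem.Int.mod s.2.1 s.2.2, PySem.Int.floordiv s.2.2 k_centers))
      ([], c, k_centers ^ (compression_height - 1).toNat)
    (r.1 ++ [r.2.1]).reverse

-- phase 2 flush body: if len(out) < cap: out.extend(row[t] for row in chunk)
def bFlushStep (cap : Int) (chunk : List (List Int)) (out : List Int) (t : Int) : List Int :=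
  if (out.length : Int) < cap then
    out ++ chunk.map (fun row => (PySem.List.pyGet? row t).getD 0)
  else out

-- while len(rest) >= width: chunk, rest = rest[:width], rest[width:]; …
-- (slices with 0 < width ≤ len(rest) are exactly take/drop)
def bChunkLoop (width cap compression_height : Int) (rest : List (List Int)) (out : List Int) : List Int :=
  if hw : 0 < width ∧ width ≤ (rest.length : Int) then
    bChunkLoop width cap compression_height (rest.drop width.toNat)
      ((PySem.List.pyRange 0 compression_height 1).foldl (bFlushStep cap (rest.take width.toNat)) out)
  else out
termination_by rest.length
decreasing_by simp only [List.length_drop]; omega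

def decompress_neighbors_vertical_alt (items : List Int) (width : Int) (height : Int) (k_centers : Int) (compression_height : Int) : List Int :=
  let tuples := items.map (bDigits k_centers compression_height)
  if 0 < width then bChunkLoop width (width * height) compression_height tuples [] else []

-- ===== PRECONDITION & SPEC =====
-- Pre_ excludes exactly the inputs on which A raises ZeroDivisionError (comp_val // pow(0, h) with
-- h ≥ 1, reached iff k_centers = 0, compression_height ≥ 2 and items is nonempty); B raises there too.
def Pre_decompress_neighbors_vertical (items : List Int) (width : Int) (height : Int) (k_centers : Int) (compression_height : Int) : Prop :=
  items = [] ∨ k_centers ≠ 0 ∨ compression_height ≤ 1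
instance (items : List Int) (width : Int) (height : Int) (k_centers : Int) (compression_height : Int) : Decidable (Pre_decompress_neighbors_vertical items width height k_centers compression_height) := by unfold Pre_decompress_neighbors_vertical; infer_instance
def pvWitness_decompress_neighbors_vertical : List Int × Int × Int × Int × Int := ([6, 3, 11, 2], 2, 2, 3, 2)

def Spec_decompress_neighbors_vertical (items : List Int) (width : Int) (height : Int) (k_centers : Int) (compression_height : Int) (out : List Int) : Prop := out = decompress_neighbors_vertical_alt items width height k_centers compression_height
instance (items : List Int) (width : Int) (height : Int) (k_centers : Int) (compression_height : Int) (out : List Int) : Decidable (Spec_decompress_neighbors_vertical items width height k_centers compression_height out) := by unfold Spec_decompress_neighbors_vertical; infer_instance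

-- ===== CLAIM (what is proved, stated in full; the proofs are below) =====
def Claim_equal_decompress_neighbors_vertical : Prop := ∀ (items : List Int) (width : Int) (height : Int) (k_centers : Int) (compression_height : Int), Dom_decompress_neighbors_vertical items width height k_centers compression_height → Pre_decompress_neighbors_vertical items width height k_centers compression_height → Spec_decompress_neighbors_vertical items width height k_centers compression_height (decompress_neighbors_vertical items width height k_centers compression_height)

-- ===== LEMMAS AND PROOFS =====

-- proof-only models of the two digit loops
def dList : Nat → List Int
  | 0 => []
  | m + 1 => (m : Int) :: dList m

def mA (k : Int) : Nat → Int → List Int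
  | 0, _ => []
  | m + 1, v => PySem.Int.floordiv v (k ^ m) :: mA k m (v - PySem.Int.floordiv v (k ^ m) * k ^ m)

def mB (k : Int) : Nat → Int → Int → List Int
  | 0, _, _ => []
  | m + 1, v, p => PySem.Int.floordiv v p :: mB k m (PySem.Int.mod v p) (PySem.Int.floordiv p k)

def mBv (k : Int) : Nat → Int → Int → Int
  | 0, v, _ => v
  | m + 1, v, p => mBv k m (PySem.Int.mod v p) (PySem.Int.floordiv p k)

def mBp (k : Int) : Nat → Int → Int → Int
  | 0, _, p => p
  | m + 1, v, p => mBp k m (PySem.Int.mod v p) (PySem.Int.floordiv p k)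

-- A's digit list for one item, and A's loop body expressed over the digit list
def digA (k ch : Int) (c : Int) : List Int :=
  ((PySem.List.pyRange (ch - 1) (-1) (-1)).foldl (aInnerStep k) ([], c)).1.reverse

def gStep (width height ch : Int) (st : List Int × List (List Int)) (r : List Int) : List Int × List (List Int) :=
  let tl := st.2 ++ [r]
  if (tl.length : Int) = width then
    ((PySem.List.pyRange 0 ch 1).foldl (aFlushStep width height tl) st.1, [])
  else (st.1, tl)

lemma aStep_eq_gStep (w h k ch : Int) :
    aStep w h k ch = fun st c => gStep w h ch st (digA k ch c) := rfl

lemma pyRange_countdown (n : Nat) :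
    PySem.List.pyRange ((n : Int) - 1) (-1) (-1) = dList n := by
  induction n with
  | zero => exact PySem.List.pyRange_neg_one_eq_nil (by omega)
  | succ m ih =>
    have h1 : ((m + 1 : Nat) : Int) - 1 = (m : Int) := by push_cast; ring
    rw [h1, PySem.List.pyRange_neg_one_cons (by omega), ih]
    rfl

lemma foldl_dList_fst (k : Int) : ∀ (m : Nat) (acc : List Int) (v : Int),
    ((dList m).foldl (aInnerStep k) (acc, v)).1 = acc ++ mA k m v := by
  intro m
  induction m with
  | zero => intro acc v; simp [dList, mA]
  | succ n ih =>
    intro acc v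
    show ((dList n).foldl (aInnerStep k) (aInnerStep k (acc, v) (n : Int))).1 = _
    have hstep : aInnerStep k (acc, v) (n : Int)
        = (acc ++ [PySem.Int.floordiv v (k ^ n)], v - PySem.Int.floordiv v (k ^ n) * k ^ n) := by
      simp [aInnerStep]
    rw [hstep, ih]
    simp [mA]

lemma foldl_bSteps (k : Int) : ∀ (l : List Int) (acc : List Int) (v p : Int),
    l.foldl (fun (s : List Int × Int × Int) _ =>
        (s.1 ++ [PySem.Int.floordiv s.2.1 s.2.2], PySem.Int.mod s.2.1 s.2.2, PySem.Int.floordiv s.2.2 k))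
      (acc, v, p)
      = (acc ++ mB k l.length v p, mBv k l.length v p, mBp k l.length v p) := by
  intro l
  induction l with
  | nil => intro acc v p; simp [mB, mBv, mBp]
  | cons x xs ih =>
    intro acc v p
    simp only [List.foldl_cons, List.length_cons]
    rw [ih]
    simp [mB, mBv, mBp]

lemma mod_eq_sub (v b : Int) : PySem.Int.mod v b = v - PySem.Int.floordiv v b * b := by
  have := PySem.Int.floordiv_mul_add_mod v b; linarith

lemma pow_floordiv_cancel (k : Int) (m : Nat) (hk : k ≠ 0) :
    PySem.Int.floordiv (k ^ (m + 1)) k = k ^ m := by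
  have : k ^ (m + 1) = k ^ m * k := by ring
  rw [this]
  simp [PySem.Int.floordiv]
  exact Int.mul_fdiv_cancel _ hk

lemma mA_eq_mB (k : Int) : ∀ (m : Nat) (v : Int), (k ≠ 0 ∨ m = 0) →
    mA k (m + 1) v = mB k m v (k ^ m) ++ [mBv k m v (k ^ m)] := by
  intro m
  induction m with
  | zero =>
    intro v _
    simp [mA, mB, mBv]
  | succ n ih =>
    intro v hk
    have hk0 : k ≠ 0 := hk.resolve_right (by omega)
    show PySem.Int.floordiv v (k ^ (n + 1)) :: mA k (n + 1) (v - PySem.Int.floordiv v (k ^ (n + 1)) * k ^ (n + 1)) = _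
    have hsub : v - PySem.Int.floordiv v (k ^ (n + 1)) * k ^ (n + 1) = PySem.Int.mod v (k ^ (n + 1)) :=
      (mod_eq_sub v (k ^ (n + 1))).symm
    rw [hsub, ih _ (Or.inl hk0)]
    simp [mB, mBv, pow_floordiv_cancel k n hk0]

-- per-item digit lists agree
lemma digA_eq_bDigits (k ch : Int) (hk : k ≠ 0 ∨ ch ≤ 1) (c : Int) :
    digA k ch c = bDigits k ch c := by
  by_cases hch : ch ≤ 0
  · unfold digA bDigits
    rw [PySem.List.pyRange_neg_one_eq_nil (by omega)]
    simp [hch]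
  · obtain ⟨m, hm⟩ : ∃ m : Nat, ch = (m : Int) + 1 := ⟨(ch - 1).toNat, by omega⟩
    subst hm
    unfold digA bDigits
    rw [if_neg (by omega)]
    have h1 : ((m : Int) + 1 - 1) = ((m : Int)) := by ring
    have h2 : ((m : Int) + 1 - 1).toNat = m := by omega
    rw [h2]
    have hcd : PySem.List.pyRange ((m : Int) + 1 - 1) (-1) (-1) = dList (m + 1) := by
      rw [h1, show (m : Int) = ((m + 1 : Nat) : Int) - 1 by push_cast; ring, pyRange_countdown]
    rw [hcd, foldl_dList_fst, h1]
    have hlen : (PySem.List.pyRange 0 (m : Int) 1).length = m := by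
      rw [PySem.List.length_pyRange_one]; omega
    rw [foldl_bSteps, hlen]
    simp only [List.nil_append]
    have hm0 : k ≠ 0 ∨ m = 0 := by
      rcases hk with h | h
      · exact Or.inl h
      · exact Or.inr (by omega)
    rw [mA_eq_mB k m c hm0]

-- phase 2: streaming with a buffer ≡ chunked consumption
lemma stream_eq_chunk (w h ch : Int) (hw : 0 < w) :
    ∀ (rows : List (List Int)) (tl : List (List Int)) (dec : List Int),
      (tl.length : Int) < w →
      (rows.foldl (gStep w h ch) (dec, tl)).1 = bChunkLoop w (w * h) ch (tl ++ rows) dec := by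
  intro rows
  induction rows with
  | nil =>
    intro tl dec htl
    rw [bChunkLoop, dif_neg (by simp; omega)]
    rfl
  | cons r rs ih =>
    intro tl dec htl
    simp only [List.foldl_cons]
    have hg : gStep w h ch (dec, tl) r
        = if ((tl ++ [r]).length : Int) = w then
            ((PySem.List.pyRange 0 ch 1).foldl (aFlushStep w h (tl ++ [r])) dec, ([] : List (List Int)))
          else (dec, tl ++ [r]) := rfl
    by_cases hc : ((tl ++ [r]).length : Int) = w
    · rw [hg, if_pos hc]
      have hlen : (tl ++ [r]).length = w.toNat := by simp at hc ⊢; omega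
      rw [bChunkLoop, dif_pos (⟨hw, by
        simp only [List.length_append, List.length_cons, List.length_nil] at hc ⊢; omega⟩)]
      have htake : (tl ++ r :: rs).take w.toNat = tl ++ [r] := by
        rw [show tl ++ r :: rs = (tl ++ [r]) ++ rs by simp]
        exact List.take_left' hlen
      have hdrop : (tl ++ r :: rs).drop w.toNat = rs := by
        rw [show tl ++ r :: rs = (tl ++ [r]) ++ rs by simp]
        exact List.drop_left' hlen
      rw [htake, hdrop]
      have hfl : aFlushStep w h (tl ++ [r]) = bFlushStep (w * h) (tl ++ [r]) := rfl
      rw [hfl]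
      have := ih [] ((PySem.List.pyRange 0 ch 1).foldl (bFlushStep (w * h) (tl ++ [r])) dec)
        (by simp; omega)
      simpa using this
    · rw [hg, if_neg hc]
      have htl' : ((tl ++ [r]).length : Int) < w := by simp at hc ⊢; omega
      rw [ih (tl ++ [r]) dec htl']
      simp

-- width ≤ 0: A never flushes
lemma stream_nonpos (w h ch : Int) (hw : ¬ 0 < w) :
    ∀ (rows : List (List Int)) (tl : List (List Int)) (dec : List Int),
      (rows.foldl (gStep w h ch) (dec, tl)).1 = dec := by
  intro rows
  induction rows with
  | nil => intro tl dec; rfl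
  | cons r rs ih =>
    intro tl dec
    simp only [List.foldl_cons]
    have hg : gStep w h ch (dec, tl) r
        = if ((tl ++ [r]).length : Int) = w then
            ((PySem.List.pyRange 0 ch 1).foldl (aFlushStep w h (tl ++ [r])) dec, ([] : List (List Int)))
          else (dec, tl ++ [r]) := rfl
    rw [hg, if_neg (by simp; omega)]
    exact ih _ _

-- ===== VERDICT (by name: the statement is the Claim_ definition above) =====
theorem decompress_neighbors_vertical_spec : Claim_equal_decompress_neighbors_vertical := by
  unfold Claim_equal_decompress_neighbors_vertical
  intro items w h k ch _ hpre
  unfold Spec_decompress_neighbors_vertical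
  unfold decompress_neighbors_vertical decompress_neighbors_vertical_alt
  rw [aStep_eq_gStep]
  rw [show items.foldl (fun st c => gStep w h ch st (digA k ch c)) (([] : List Int), ([] : List (List Int)))
        = (items.map (digA k ch)).foldl (gStep w h ch) ([], []) from (List.foldl_map).symm]
  by_cases hw : 0 < w
  · have hrows : items.map (digA k ch) = items.map (bDigits k ch) := by
      rcases hpre with h0 | hk
      · subst h0; rfl
      · exact List.map_congr_left (fun c _ => digA_eq_bDigits k ch hk c)
    rw [hrows]
    rw [stream_eq_chunk w h ch hw (items.map (bDigits k ch)) [] [] (by simpa using hw)]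
    simp [hw]
  · rw [stream_nonpos w h ch hw]
    simp [hw]
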